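-- pv_equiv track=rewrite | github.com/atopile/atopile | src/atopile/layout_server/pcb_manager.py | _resolve_text_tokens
-- ===== SOURCE A (Python) =====
-- def _resolve_text_tokens(text: str, reference: str | None, value: str | None) -> str:
--     if not text:
--         return text
--
--     ref_text = reference or ""
--     value_text = value or ""
--     out = text.replace("%R", ref_text).replace("%V", value_text)
--
--     replacements = {
--         "REFERENCE": ref_text,
--         "REF": ref_text,
--         "REFDES": ref_text,
--         "VALUE": value_text,
--         "VAL": value_text,
--     }
--
--     result_parts: list[str] = []
--     i = 0
--     while i < len(out):
--         if i + 2 < len(out) and out[i] == "$" and out[i + 1] == "{":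
--             end = out.find("}", i + 2)
--             if end != -1:
--                 key = out[i + 2 : end].strip().upper()
--                 if key in replacements:
--                     result_parts.append(replacements[key])
--                 else:
--                     result_parts.append(out[i : end + 1])
--                 i = end + 1
--                 continue
--         result_parts.append(out[i])
--         i += 1
--
--     return "".join(result_parts)
-- ===== SOURCE B (Python) =====
-- def _resolve_text_tokens(text: str, reference: str | None, value: str | None) -> str:
--     if not text:
--         return text
--
--     ref_text = reference or ""
--     value_text = value or ""
--     out = text.replace("%R", ref_text).replace("%V", value_text)
--
--     replacements = {
--         "REFERENCE": ref_text,
--         "REF": ref_text,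
--         "REFDES": ref_text,
--         "VALUE": value_text,
--         "VAL": value_text,
--     }
--
--     # Jump-scan: hop between "${...}" tokens with str.find instead of
--     # walking the string character by character.
--     parts: list[str] = []
--     pos = 0
--     while True:
--         start = out.find("${", pos)
--         if start == -1:
--             parts.append(out[pos:])
--             break
--         end = out.find("}", start + 2)
--         if end == -1:
--             parts.append(out[pos:])
--             break
--         parts.append(out[pos:start])
--         key = out[start + 2:end].strip().upper()
--         parts.append(replacements.get(key, out[start:end + 1]))
--         pos = end + 1
--     return "".join(parts)
-- ===== Notes on version B (the rewrite author's own statement) =====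
-- stated objective: faster
-- what changed: A scans the string character by character with an index loop, appending one character per iteration; B jump-scans with str.find, hopping directly from one "${...}" token to the next and appending whole slices, so there is no per-character Python-level loop.
import Mathlib
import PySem

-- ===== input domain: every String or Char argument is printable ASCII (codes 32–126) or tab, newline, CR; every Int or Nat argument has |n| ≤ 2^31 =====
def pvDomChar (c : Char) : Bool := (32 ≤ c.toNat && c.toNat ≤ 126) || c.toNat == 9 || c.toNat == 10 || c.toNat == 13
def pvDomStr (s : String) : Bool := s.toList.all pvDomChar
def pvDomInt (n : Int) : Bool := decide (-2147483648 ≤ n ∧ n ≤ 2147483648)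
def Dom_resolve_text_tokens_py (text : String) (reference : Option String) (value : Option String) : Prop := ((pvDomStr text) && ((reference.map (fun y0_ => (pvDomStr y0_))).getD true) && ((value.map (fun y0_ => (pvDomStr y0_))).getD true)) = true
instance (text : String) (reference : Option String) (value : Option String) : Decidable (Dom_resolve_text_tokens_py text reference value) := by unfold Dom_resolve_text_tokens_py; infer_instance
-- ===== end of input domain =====

-- ===== PORT A =====
-- B replaces A's per-character while-loop with a jump-scan between "${...}" tokens using str.find.
-- Both ports work on the string's character list; Python str ops map to PySem.Chars/PySem.List.

-- helpers shared by both Pythons (same dict literal and key normalisation in Source A and Source B)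
def pvNormKey (k : List Char) : List Char := PySem.Chars.upper (PySem.Chars.strip k)

def pvReplMap (refText valText : List Char) : PySem.Dict (List Char) (List Char) :=
  PySem.Dict.ofList [("REFERENCE".toList, refText), ("REF".toList, refText),
    ("REFDES".toList, refText), ("VALUE".toList, valText), ("VAL".toList, valText)]

-- facts about str.find(sub, start) at a nonnegative start, used by the ports' termination proofs
theorem pvFindFrom_facts (s sub : List Char) (k : Nat) (hsub : sub ≠ [])
    (h : PySem.Chars.findFrom s sub (k : Int) ≠ -1) :
    k ≤ s.length ∧ (k : Int) ≤ PySem.Chars.findFrom s sub (k : Int) ∧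
      sub <+: s.drop (PySem.Chars.findFrom s sub (k : Int)).toNat ∧
      (∀ i : Nat, k ≤ i → i < (PySem.Chars.findFrom s sub (k : Int)).toNat → ¬ sub <+: s.drop i) ∧
      (PySem.Chars.findFrom s sub (k : Int)).toNat + sub.length ≤ s.length := by
  have hk : k ≤ s.length := by
    by_contra hgt
    apply h
    simp only [PySem.Chars.findFrom]
    have h1 : ¬ ((k : Int) < 0) := by omega
    have h2 : ((s.length : Int) < (k : Int)) := by omega
    simp [h1, h2]
  obtain ⟨h1, h2, h3⟩ := PySem.Chars.findFrom_natCast_spec s sub k hk h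
  have hlen := h2.length_le
  rw [List.length_drop] at hlen
  have hpos : 0 < sub.length := List.length_pos_of_ne_nil hsub
  exact ⟨hk, h1, h2, h3, by omega⟩

def pvLoopA (cs : List Char) (rep : PySem.Dict (List Char) (List Char)) (i : Nat)
    (acc : List (List Char)) : List (List Char) :=
  if hi : i < cs.length then
    if hc : i + 2 < cs.length ∧ cs.getD i ' ' = '$' ∧ cs.getD (i + 1) ' ' = '{' then
      -- end = out.find("}", i + 2)
      if he : PySem.Chars.findFrom cs ['}'] ((i + 2 : Nat) : Int) ≠ -1 then
        pvLoopA cs rep ((PySem.Chars.findFrom cs ['}'] ((i + 2 : Nat) : Int)).toNat + 1)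
          (acc ++ [match rep.get? (pvNormKey (PySem.List.slice cs (some ((i + 2 : Nat) : Int))
                (some (PySem.Chars.findFrom cs ['}'] ((i + 2 : Nat) : Int))))) with
            | some v => v
            | none => PySem.List.slice cs (some ((i : Nat) : Int))
                (some (PySem.Chars.findFrom cs ['}'] ((i + 2 : Nat) : Int) + 1))])
      else
        pvLoopA cs rep (i + 1) (acc ++ [[cs.getD i ' ']])
    else
      pvLoopA cs rep (i + 1) (acc ++ [[cs.getD i ' ']])
  else acc
termination_by cs.length - i
decreasing_by
  · obtain ⟨h1, h2, h3, h4, h5⟩ := pvFindFrom_facts cs ['}'] (i + 2) (by simp) he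
    omega
  · omega
  · omega

def resolve_text_tokens_py (text : String) (reference : Option String) (value : Option String) : String :=
  if text.toList = [] then text
  else
    let refText := (reference.getD "").toList
    let valText := (value.getD "").toList
    let out := PySem.Chars.replace (PySem.Chars.replace text.toList "%R".toList refText)
      "%V".toList valText
    String.mk (pvLoopA out (pvReplMap refText valText) 0 []).flatten

-- ===== PORT B =====
def pvLoopB (cs : List Char) (rep : PySem.Dict (List Char) (List Char)) (pos : Nat)
    (acc : List (List Char)) : List (List Char) :=
  -- start = out.find("${", pos)
  if hs : PySem.Chars.findFrom cs ['$', '{'] (pos : Int) = -1 then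
    acc ++ [PySem.List.slice cs (some (pos : Int)) none]
  else
    -- end = out.find("}", start + 2)
    if he : PySem.Chars.findFrom cs ['}'] (PySem.Chars.findFrom cs ['$', '{'] (pos : Int) + 2) = -1 then
      acc ++ [PySem.List.slice cs (some (pos : Int)) none]
    else
      pvLoopB cs rep
        ((PySem.Chars.findFrom cs ['}']
            (PySem.Chars.findFrom cs ['$', '{'] (pos : Int) + 2)).toNat + 1)
        (acc ++ [PySem.List.slice cs (some (pos : Int))
            (some (PySem.Chars.findFrom cs ['$', '{'] (pos : Int))),
          rep.getD
            (pvNormKey (PySem.List.slice cs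
              (some (PySem.Chars.findFrom cs ['$', '{'] (pos : Int) + 2))
              (some (PySem.Chars.findFrom cs ['}']
                (PySem.Chars.findFrom cs ['$', '{'] (pos : Int) + 2)))))
            (PySem.List.slice cs (some (PySem.Chars.findFrom cs ['$', '{'] (pos : Int)))
              (some (PySem.Chars.findFrom cs ['}']
                (PySem.Chars.findFrom cs ['$', '{'] (pos : Int) + 2) + 1)))])
termination_by cs.length - pos
decreasing_by
  obtain ⟨hs1, hs2, hs3, hs4, hs5⟩ := pvFindFrom_facts cs ['$', '{'] pos (by simp) hs
  have hcast : PySem.Chars.findFrom cs ['$', '{'] (pos : Int) + 2 =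
      (((PySem.Chars.findFrom cs ['$', '{'] (pos : Int)).toNat + 2 : Nat) : Int) := by omega
  rw [hcast] at he
  obtain ⟨he1, he2, he3, he4, he5⟩ :=
    pvFindFrom_facts cs ['}'] ((PySem.Chars.findFrom cs ['$', '{'] (pos : Int)).toNat + 2)
      (by simp) he
  rw [hcast]
  omega

def resolve_text_tokens_py_alt (text : String) (reference : Option String) (value : Option String) : String :=
  if text.toList = [] then text
  else
    let refText := (reference.getD "").toList
    let valText := (value.getD "").toList
    let out := PySem.Chars.replace (PySem.Chars.replace text.toList "%R".toList refText)
      "%V".toList valText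
    String.mk (pvLoopB out (pvReplMap refText valText) 0 []).flatten

-- ===== PRECONDITION & SPEC =====
def Spec_resolve_text_tokens_py (text : String) (reference : Option String) (value : Option String) (out : String) : Prop := out = resolve_text_tokens_py_alt text reference value
instance (text : String) (reference : Option String) (value : Option String) (out : String) : Decidable (Spec_resolve_text_tokens_py text reference value out) := by unfold Spec_resolve_text_tokens_py; infer_instance

-- ===== CLAIM (what is proved, stated in full; the proofs are below) =====
def Claim_equal_resolve_text_tokens_py : Prop := ∀ (text : String) (reference : Option String) (value : Option String), Dom_resolve_text_tokens_py text reference value → Spec_resolve_text_tokens_py text reference value (resolve_text_tokens_py text reference value)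

-- ===== LEMMAS AND PROOFS =====

-- the common scanner both loops compute: leftmost "${...}" token, nearest closing brace
def pvScan (rep : PySem.Dict (List Char) (List Char)) : List Char → List Char
  | [] => []
  | c :: rest =>
    if c = '$' ∧ rest.head? = some '{' ∧ PySem.Chars.find rest.tail ['}'] ≠ -1 then
      (match rep.get? (pvNormKey (rest.tail.take (PySem.Chars.find rest.tail ['}']).toNat)) with
        | some v => v
        | none => '$' :: '{' :: rest.tail.take ((PySem.Chars.find rest.tail ['}']).toNat + 1)) ++
        pvScan rep (rest.tail.drop ((PySem.Chars.find rest.tail ['}']).toNat + 1))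
    else c :: pvScan rep rest
termination_by l => l.length
decreasing_by
  · have h1 : rest.tail.length ≤ rest.length := by cases rest <;> simp
    simp only [List.length_drop, List.length_cons]
    omega
  · simp only [List.length_cons]; omega

-- "a token starts here": '$' then '{' then a '}' somewhere after
def pvIsTok (l : List Char) : Prop :=
  l.head? = some '$' ∧ l.tail.head? = some '{' ∧ PySem.Chars.find l.tail.tail ['}'] ≠ -1

theorem pvSingleton_infix (c : Char) (l : List Char) : [c] <:+: l ↔ c ∈ l := by
  constructor
  · intro h
    exact List.singleton_sublist.mp h.sublist
  · intro h
    obtain ⟨s, t, rfl⟩ := List.append_of_mem h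
    exact ⟨s, t, by simp⟩

theorem pvScan_cons_not (rep : PySem.Dict (List Char) (List Char)) (c : Char) (rest : List Char)
    (h : ¬ pvIsTok (c :: rest)) : pvScan rep (c :: rest) = c :: pvScan rep rest := by
  rw [pvScan]
  rw [if_neg (by simpa [pvIsTok] using h)]

theorem pvScan_tok (rep : PySem.Dict (List Char) (List Char)) (r : List Char)
    (h : PySem.Chars.find r ['}'] ≠ -1) :
    pvScan rep ('$' :: '{' :: r) =
      (match rep.get? (pvNormKey (r.take (PySem.Chars.find r ['}']).toNat)) with
        | some v => v
        | none => '$' :: '{' :: r.take ((PySem.Chars.find r ['}']).toNat + 1)) ++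
        pvScan rep (r.drop ((PySem.Chars.find r ['}']).toNat + 1)) := by
  rw [pvScan]
  rw [if_pos ⟨rfl, rfl, by simpa using h⟩]
  simp only [List.tail_cons]

theorem pvScan_copy (rep : PySem.Dict (List Char) (List Char)) :
    ∀ (k : Nat) (l : List Char), (∀ j, j < k → ¬ pvIsTok (l.drop j)) →
      pvScan rep l = l.take k ++ pvScan rep (l.drop k) := by
  intro k
  induction k with
  | zero => simp
  | succ k ih =>
    intro l h
    cases l with
    | nil => simp
    | cons c rest =>
      have h0 : ¬ pvIsTok (c :: rest) := by simpa using h 0 (by omega)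
      rw [pvScan_cons_not rep c rest h0]
      rw [ih rest (fun j hj => by simpa using h (j + 1) (by omega))]
      simp

theorem pvScan_nomatch (rep : PySem.Dict (List Char) (List Char)) (l : List Char)
    (h : ∀ j, ¬ pvIsTok (l.drop j)) : pvScan rep l = l := by
  have := pvScan_copy rep l.length l (fun j _ => h j)
  simpa [pvScan] using this

theorem pvLoopA_eq (rep : PySem.Dict (List Char) (List Char)) :
    ∀ (n : Nat) (i : Nat) (cs : List Char) (acc : List (List Char)), cs.length - i ≤ n →
      (pvLoopA cs rep i acc).flatten = acc.flatten ++ pvScan rep (cs.drop i) := by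
  intro n
  induction n with
  | zero =>
    intro i cs acc hn
    rw [pvLoopA, dif_neg (by omega)]
    rw [List.drop_of_length_le (by omega)]
    simp [pvScan]
  | succ n ih =>
    intro i cs acc hn
    by_cases hi : i < cs.length
    case neg =>
      rw [pvLoopA, dif_neg hi]
      rw [List.drop_of_length_le (by omega)]
      simp [pvScan]
    case pos =>
    rw [pvLoopA, dif_pos hi]
    by_cases hc : i + 2 < cs.length ∧ cs.getD i ' ' = '$' ∧ cs.getD (i + 1) ' ' = '{'
    case pos =>
      rw [dif_pos hc]
      obtain ⟨hlen, hdol, hbr⟩ := hc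
      have hgi : cs[i] = '$' := by rw [← List.getD_eq_getElem cs ' ' hi]; exact hdol
      have hi1 : i + 1 < cs.length := by omega
      have hgi1 : cs[i + 1] = '{' := by rw [← List.getD_eq_getElem cs ' ' hi1]; exact hbr
      have hdropi : cs.drop i = '$' :: '{' :: cs.drop (i + 2) := by
        rw [List.drop_eq_getElem_cons hi, List.drop_eq_getElem_cons hi1, hgi, hgi1]
      by_cases he : PySem.Chars.findFrom cs ['}'] ((i + 2 : Nat) : Int) ≠ -1
      case pos =>
        rw [dif_pos he]
        obtain ⟨hk, hge, hpre, hmin, hbnd⟩ := pvFindFrom_facts cs ['}'] (i + 2) (by simp) he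
        have hfe := PySem.Chars.findFrom_natCast cs ['}'] (i + 2) (by omega)
        set f := PySem.Chars.find (List.drop (i + 2) cs) ['}'] with hfdef
        have hfne : f ≠ -1 := by
          intro hf
          rw [hf] at hfe
          simp at hfe
          exact he hfe
        have hf0 : 0 ≤ f := by
          have := PySem.Chars.neg_one_le_find (List.drop (i + 2) cs) ['}']
          rw [← hfdef] at this
          omega
        have heq : PySem.Chars.findFrom cs ['}'] ((i + 2 : Nat) : Int) = ((i + 2 + f.toNat : Nat) : Int) := by
          rw [hfe, if_neg hfne]
          omega
        rw [ih _ cs _ (by rw [heq] at hbnd hge; simp at hbnd hge; omega)]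
        rw [hdropi, pvScan_tok rep _ (by rw [← hfdef]; exact hfne)]
        rw [heq]
        rw [← hfdef]
        have hsl1 : PySem.List.slice cs (some ((i + 2 : Nat) : Int)) (some ((i + 2 + f.toNat : Nat) : Int)) =
            List.take f.toNat (List.drop (i + 2) cs) := by
          rw [PySem.List.slice_natCast]
          congr 1
          omega
        have hcast1 : ((i + 2 + f.toNat : Nat) : Int) + 1 = ((i + 3 + f.toNat : Nat) : Int) := by omega
        have hsl2 : PySem.List.slice cs (some ((i : Nat) : Int)) (some ((i + 3 + f.toNat : Nat) : Int)) =
            '$' :: '{' :: List.take (f.toNat + 1) (List.drop (i + 2) cs) := by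
          rw [PySem.List.slice_natCast]
          rw [show i + 3 + f.toNat - i = (f.toNat + 1) + 1 + 1 from by omega]
          rw [hdropi]
          simp [List.take_succ_cons]
        have hdr : List.drop ((((i + 2 + f.toNat : Nat) : Int)).toNat + 1) cs =
            List.drop (f.toNat + 1) (List.drop (i + 2) cs) := by
          rw [List.drop_drop]
          congr 1
        rw [hsl1, hcast1, hsl2, hdr]
        simp
      case neg =>
        rw [dif_neg he]
        simp only [not_not] at he
        have hfne : PySem.Chars.find (List.drop (i + 2) cs) ['}'] = -1 := by
          have hfe := PySem.Chars.findFrom_natCast cs ['}'] (i + 2) (by omega)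
          by_contra hf
          rw [hfe, if_neg hf] at he
          have := PySem.Chars.neg_one_le_find (List.drop (i + 2) cs) ['}']
          omega
        rw [ih _ cs _ (by omega)]
        rw [List.drop_eq_getElem_cons hi]
        rw [pvScan_cons_not rep _ _ (by
          simp only [pvIsTok, List.head?_cons, List.tail_cons, List.head?_drop, List.tail_drop]
          intro htok
          exact htok.2.2 hfne)]
        simp [List.getElem?_eq_getElem hi, hgi]
    case neg =>
      rw [dif_neg hc]
      rw [ih _ cs _ (by omega)]
      rw [List.drop_eq_getElem_cons hi]
      rw [pvScan_cons_not rep _ _ (by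
        simp only [pvIsTok, List.head?_cons, List.tail_cons, List.head?_drop, List.tail_drop]
        intro htok
        apply hc
        obtain ⟨ht1, ht2, ht3⟩ := htok
        have hmem : '}' ∈ List.drop (i + 2) cs := by
          rw [← pvSingleton_infix]
          exact (PySem.Chars.find_ne_neg_one_iff _ _).mp ht3
        have hne : List.drop (i + 2) cs ≠ [] := by
          intro hnil
          rw [hnil] at hmem
          simp at hmem
        have hlen2 : i + 2 < cs.length := by
          by_contra hle
          exact hne (List.drop_of_length_le (by omega))
        have hi1 : i + 1 < cs.length := by omega
        rw [List.getElem?_eq_getElem hi1] at ht2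
        refine ⟨hlen2, ?_, ?_⟩
        · rw [List.getD_eq_getElem cs ' ' hi]
          exact Option.some.inj (by simpa [List.getElem?_eq_getElem hi] using ht1)
        · rw [List.getD_eq_getElem cs ' ' hi1]; simpa using ht2)]
      simp [List.getElem?_eq_getElem hi]

theorem pvIsTok_shape (l : List Char) (h : pvIsTok l) :
    ∃ r, l = '$' :: '{' :: r ∧ PySem.Chars.find r ['}'] ≠ -1 := by
  obtain ⟨h1, h2, h3⟩ := h
  cases l with
  | nil => simp at h1
  | cons a l' =>
    cases l' with
    | nil => simp at h2
    | cons b l'' =>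
      simp only [List.head?_cons, Option.some.injEq] at h1
      simp only [List.tail_cons, List.head?_cons, Option.some.injEq] at h2
      exact ⟨l'', by simp [h1, h2], by simpa using h3⟩

theorem pvPrefix_drop_infix (l p : List Char) (n : Nat) (h : p <+: l.drop n) : p <:+: l :=
  h.isInfix.trans (List.drop_suffix n l).isInfix

theorem pvMem_drop_mono (a : Char) (l : List Char) (m k : Nat) (hk : k ≤ m)
    (h : a ∈ l.drop m) : a ∈ l.drop k := by
  have hd : l.drop m = (l.drop k).drop (m - k) := by
    rw [List.drop_drop]
    congr 1
    omega
  rw [hd] at h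
  exact List.mem_of_mem_drop h

theorem pvLoopB_eq (rep : PySem.Dict (List Char) (List Char)) :
    ∀ (n : Nat) (pos : Nat) (cs : List Char) (acc : List (List Char)),
      cs.length - pos ≤ n → pos ≤ cs.length →
      (pvLoopB cs rep pos acc).flatten = acc.flatten ++ pvScan rep (cs.drop pos) := by
  intro n
  induction n with
  | zero =>
    intro pos cs acc hn hp
    have hdrop : List.drop pos cs = [] := List.drop_of_length_le (by omega)
    have hs : PySem.Chars.findFrom cs ['$', '{'] (pos : Int) = -1 := by
      rw [PySem.Chars.findFrom_natCast_eq_neg_one_iff cs ['$', '{'] pos hp, hdrop]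
      intro hinf
      have := hinf.sublist.length_le
      simp at this
    rw [pvLoopB, dif_pos hs]
    rw [PySem.List.slice_from cs (by omega)]
    simp [hdrop, pvScan]
  | succ n ih =>
    intro pos cs acc hn hp
    by_cases hs : PySem.Chars.findFrom cs ['$', '{'] (pos : Int) = -1
    case pos =>
      rw [pvLoopB, dif_pos hs]
      rw [PySem.List.slice_from cs (by omega)]
      have hno := (PySem.Chars.findFrom_natCast_eq_neg_one_iff cs ['$', '{'] pos hp).mp hs
      have hscan : pvScan rep (List.drop pos cs) = List.drop pos cs := by
        apply pvScan_nomatch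
        intro j htok
        obtain ⟨r, hr, _⟩ := pvIsTok_shape _ htok
        apply hno
        exact pvPrefix_drop_infix _ _ j (by rw [hr]; exact ⟨r, by simp⟩)
      rw [hscan]
      simp
    case neg =>
      obtain ⟨hp', hsge, hspre, hsmin, hsbnd⟩ :=
        pvFindFrom_facts cs ['$', '{'] pos (by simp) hs
      simp only [List.length_cons, List.length_singleton] at hsbnd
      have hcast : PySem.Chars.findFrom cs ['$', '{'] (pos : Int) + 2 =
          (((PySem.Chars.findFrom cs ['$', '{'] (pos : Int)).toNat + 2 : Nat) : Int) := by omega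
      -- the token positions relative to drop pos
      have hdd : ∀ j : Nat, (List.drop pos cs).drop j = List.drop (pos + j) cs := by
        intro j
        rw [List.drop_drop]
      by_cases he : PySem.Chars.findFrom cs ['}']
          (PySem.Chars.findFrom cs ['$', '{'] (pos : Int) + 2) = -1
      case pos =>
        rw [pvLoopB, dif_neg hs, dif_pos he]
        rw [hcast] at he
        have hno2 := (PySem.Chars.findFrom_natCast_eq_neg_one_iff cs ['}'] _ (by omega)).mp he
        have hno2' : '}' ∉ List.drop ((PySem.Chars.findFrom cs ['$', '{'] (pos : Int)).toNat + 2) cs := by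
          intro hmem
          exact hno2 ((pvSingleton_infix _ _).mpr hmem)
        rw [PySem.List.slice_from cs (by omega)]
        have hscan : pvScan rep (List.drop pos cs) = List.drop pos cs := by
          apply pvScan_nomatch
          intro j htok
          obtain ⟨r, hr, hfr⟩ := pvIsTok_shape _ htok
          rw [hdd j] at hr
          have hrdrop : r = List.drop (pos + j + 2) cs := by
            have := congrArg (List.drop 2) hr
            rw [List.drop_drop] at this
            simpa [show 2 + (pos + j) = pos + j + 2 from by omega] using this.symm
          have hmem : '}' ∈ r := (pvSingleton_infix _ _).mp
            ((PySem.Chars.find_ne_neg_one_iff _ _).mp hfr)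
          by_cases hq : pos + j < (PySem.Chars.findFrom cs ['$', '{'] (pos : Int)).toNat
          · exact hsmin (pos + j) (by omega) hq ⟨r, by rw [hr]; rfl⟩
          · apply hno2'
            apply pvMem_drop_mono '}' cs (pos + j + 2) _ (by omega)
            rw [← hrdrop]
            exact hmem
        rw [hscan]
        simp
      case neg =>
        rw [pvLoopB, dif_neg hs, dif_neg he]
        rw [hcast] at he ⊢
        obtain ⟨he1, hege, hepre, hemin, hebnd⟩ :=
          pvFindFrom_facts cs ['}'] ((PySem.Chars.findFrom cs ['$', '{'] (pos : Int)).toNat + 2)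
            (by simp) he
        simp only [List.length_singleton] at hebnd
        have hfe := PySem.Chars.findFrom_natCast cs ['}']
          ((PySem.Chars.findFrom cs ['$', '{'] (pos : Int)).toNat + 2) (by omega)
        set sN := (PySem.Chars.findFrom cs ['$', '{'] (pos : Int)).toNat with hsN
        set f := PySem.Chars.find (List.drop (sN + 2) cs) ['}'] with hfdef
        have hfne : f ≠ -1 := by
          intro hf
          rw [hf] at hfe
          simp at hfe
          exact he hfe
        have hf0 : 0 ≤ f := by
          have := PySem.Chars.neg_one_le_find (List.drop (sN + 2) cs) ['}']
          rw [← hfdef] at this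
          omega
        have heq : PySem.Chars.findFrom cs ['}'] ((sN + 2 : Nat) : Int) =
            ((sN + 2 + f.toNat : Nat) : Int) := by
          rw [hfe, if_neg hfne]
          omega
        rw [heq]
        -- the recursive call through ih
        rw [ih _ cs _ (by rw [heq] at hebnd hege; simp at hebnd hege; omega)
          (by rw [heq] at hebnd; simp at hebnd; omega)]
        -- decompose the scan side: copy up to sN, then the token
        have hdropS : List.drop sN cs = '$' :: '{' :: List.drop (sN + 2) cs := by
          obtain ⟨t, ht⟩ := hspre
          have ht2 : List.drop (sN + 2) cs = t := by
            have := congrArg (List.drop 2) ht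
            rw [List.drop_drop] at this
            simpa [show 2 + sN = sN + 2 from by omega] using this.symm
          rw [← ht, ht2]
          simp
        have hcopy : pvScan rep (List.drop pos cs) =
            (List.drop pos cs).take (sN - pos) ++ pvScan rep (List.drop sN cs) := by
          rw [pvScan_copy rep (sN - pos) (List.drop pos cs) (by
            intro j hj htok
            obtain ⟨r, hr, _⟩ := pvIsTok_shape _ htok
            rw [hdd j] at hr
            exact hsmin (pos + j) (by omega) (by omega) ⟨r, by rw [hr]; rfl⟩)]
          rw [hdd (sN - pos), show pos + (sN - pos) = sN from by omega]
        rw [hcopy, hdropS, pvScan_tok rep _ (by rw [← hfdef]; exact hfne), ← hfdef]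
        -- slices
        have hcast0 : PySem.Chars.findFrom cs ['$', '{'] (pos : Int) = ((sN : Nat) : Int) := by omega
        rw [hcast0]
        have hsl0 : PySem.List.slice cs (some ((pos : Nat) : Int)) (some ((sN : Nat) : Int)) =
            List.take (sN - pos) (List.drop pos cs) := by
          rw [PySem.List.slice_natCast]
        have hsl1 : PySem.List.slice cs (some ((sN + 2 : Nat) : Int)) (some ((sN + 2 + f.toNat : Nat) : Int)) =
            List.take f.toNat (List.drop (sN + 2) cs) := by
          rw [PySem.List.slice_natCast]
          congr 1
          omega
        have hcast1 : ((sN + 2 + f.toNat : Nat) : Int) + 1 = ((sN + 3 + f.toNat : Nat) : Int) := by omega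
        have hsl2 : PySem.List.slice cs (some ((sN : Nat) : Int)) (some ((sN + 3 + f.toNat : Nat) : Int)) =
            '$' :: '{' :: List.take (f.toNat + 1) (List.drop (sN + 2) cs) := by
          rw [PySem.List.slice_natCast]
          rw [show sN + 3 + f.toNat - sN = (f.toNat + 1) + 1 + 1 from by omega]
          rw [hdropS]
          simp [List.take_succ_cons]
        have hdr : List.drop ((((sN + 2 + f.toNat : Nat) : Int)).toNat + 1) cs =
            List.drop (f.toNat + 1) (List.drop (sN + 2) cs) := by
          rw [List.drop_drop]
          congr 1
        have hgetD : ∀ (k d : List Char), rep.getD k d =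
            (match rep.get? k with | some x => x | none => d) := by
          intro k d
          cases h : rep.get? k <;> simp [PySem.Dict.getD, h]
        rw [hsl0, hsl1, hcast1, hsl2, hdr, hgetD]
        simp

theorem pvLoop_main (cs : List Char) (rep : PySem.Dict (List Char) (List Char)) :
    (pvLoopA cs rep 0 []).flatten = (pvLoopB cs rep 0 []).flatten := by
  rw [pvLoopA_eq rep cs.length 0 cs [] (by omega),
    pvLoopB_eq rep cs.length 0 cs [] (by omega) (by omega)]

-- ===== VERDICT (by name: the statement is the Claim_ definition above) =====
theorem resolve_text_tokens_py_spec : Claim_equal_resolve_text_tokens_py := by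
  intro text reference value _
  unfold Spec_resolve_text_tokens_py resolve_text_tokens_py resolve_text_tokens_py_alt
  by_cases h : text.toList = []
  · simp [h]
  · simp only [h, if_false]
    rw [pvLoop_main]
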